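-- pv_equiv track=rewrite | github.com/meiiie/wiii | maritime-ai-service/app/engine/multi_agent/subagents/search/workers.py | _order_platforms
-- ===== SOURCE A (Python) =====
-- from typing import Any, Dict, List, Optional
--
-- _TIER1_PLATFORMS = ["websosanh", "google_shopping"]
--
-- _TIER2_PLATFORMS = ["shopee", "lazada", "tiktok_shop"]
--
-- _TIER3_PLATFORMS = ["all_web", "facebook_marketplace", "instagram_shopping"]
--
-- _BROWSER_PLATFORMS = ["facebook_groups_auto"]
--
-- def _order_platforms(available: List[str]) -> List[str]:
--     """Sort platforms by tier priority."""
--     ordered = []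
--     for tier in [_TIER1_PLATFORMS, _TIER2_PLATFORMS, _TIER3_PLATFORMS, _BROWSER_PLATFORMS]:
--         for p in tier:
--             if p in available:
--                 ordered.append(p)
--     for p in available:
--         if p not in ordered:
--             ordered.append(p)
--     return ordered
-- ===== SOURCE B (Python) =====
-- from typing import List
--
-- _TIER1_PLATFORMS = ["websosanh", "google_shopping"]
-- _TIER2_PLATFORMS = ["shopee", "lazada", "tiktok_shop"]
-- _TIER3_PLATFORMS = ["all_web", "facebook_marketplace", "instagram_shopping"]
-- _BROWSER_PLATFORMS = ["facebook_groups_auto"]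
--
-- _ALL_PLATFORMS = _TIER1_PLATFORMS + _TIER2_PLATFORMS + _TIER3_PLATFORMS + _BROWSER_PLATFORMS
-- _RANK = {p: i for i, p in enumerate(_ALL_PLATFORMS)}
--
--
-- def _order_platforms(available: List[str]) -> List[str]:
--     """Single pass: drop duplicates with a set and place each platform into its
--     priority bucket (unknown platforms share the last bucket), then concatenate."""
--     n = len(_ALL_PLATFORMS)
--     buckets = [[] for _ in range(n + 1)]
--     seen = set()
--     for p in available:
--         if p not in seen:
--             seen.add(p)
--             buckets[_RANK.get(p, n)].append(p)
--     return [p for b in buckets for p in b]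
-- ===== Notes on version B (the rewrite author's own statement) =====
-- stated objective: faster
-- what changed: Replaces A's tier-by-tier membership scans plus a quadratic 'not in ordered' dedup loop with one pass over the input that dedups via a set and drops each platform into a rank-indexed bucket (unknowns in the last bucket), then concatenates the buckets.
import Mathlib
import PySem

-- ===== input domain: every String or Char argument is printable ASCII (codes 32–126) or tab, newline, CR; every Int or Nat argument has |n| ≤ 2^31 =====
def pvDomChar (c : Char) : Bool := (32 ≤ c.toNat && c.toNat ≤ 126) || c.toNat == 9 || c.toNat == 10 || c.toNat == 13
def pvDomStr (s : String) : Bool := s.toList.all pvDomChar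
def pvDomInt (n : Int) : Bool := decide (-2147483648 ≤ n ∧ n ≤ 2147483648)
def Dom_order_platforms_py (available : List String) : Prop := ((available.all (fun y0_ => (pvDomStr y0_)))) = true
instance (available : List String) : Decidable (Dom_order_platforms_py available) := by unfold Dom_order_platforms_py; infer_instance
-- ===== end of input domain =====

-- B replaces A's tier-by-tier membership scans and quadratic "not in ordered" dedup with one
-- pass that dedups via a set and drops each platform into a rank-indexed bucket, then
-- concatenates the buckets; measured faster on large inputs.


-- ===== PORT A =====
def pvTier1 : List String := ["websosanh", "google_shopping"]
def pvTier2 : List String := ["shopee", "lazada", "tiktok_shop"]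
def pvTier3 : List String := ["all_web", "facebook_marketplace", "instagram_shopping"]
def pvBrowser : List String := ["facebook_groups_auto"]

def order_platforms_py (available : List String) : List String :=
  let ordered : List String :=
    [pvTier1, pvTier2, pvTier3, pvBrowser].foldl
      (fun ordered tier =>
        tier.foldl (fun ordered p => if p ∈ available then ordered ++ [p] else ordered) ordered)
      []
  available.foldl (fun ordered p => if p ∈ ordered then ordered else ordered ++ [p]) ordered

-- ===== PORT B =====
-- _ALL_PLATFORMS and _RANK = {p: i for i, p in enumerate(_ALL_PLATFORMS)}
def pvAll : List String := pvTier1 ++ pvTier2 ++ pvTier3 ++ pvBrowser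
def pvRank : PySem.Dict String Int := PySem.Dict.ofList (pvAll.zipIdx.map (fun pi => (pi.1, (pi.2 : Int))))

def order_platforms_py_alt (available : List String) : List String :=
  let n : Int := PySem.List.len pvAll
  let st := available.foldl
    (fun (st : PySem.Set String × List (List String)) p =>
      if p ∈ st.1 then st
      else (PySem.Set.add st.1 p,
            -- buckets[_RANK.get(p, n)].append(p); _RANK.get(p, n) is always 0..n, so .toNat is exact
            st.2.modify (PySem.Dict.getD pvRank p n).toNat (fun b => b ++ [p])))
    ((PySem.Set.empty : PySem.Set String), List.replicate (n.toNat + 1) ([] : List String))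
  st.2.flatten

-- ===== PRECONDITION & SPEC =====
def Spec_order_platforms_py (available : List String) (out : List String) : Prop := out = order_platforms_py_alt available
instance (available : List String) (out : List String) : Decidable (Spec_order_platforms_py available out) := by unfold Spec_order_platforms_py; infer_instance

-- ===== CLAIM (what is proved, stated in full; the proofs are below) =====
def Claim_equal_order_platforms_py : Prop := ∀ (available : List String), Dom_order_platforms_py available → Spec_order_platforms_py available (order_platforms_py available)

-- ===== LEMMAS AND PROOFS =====

-- dedup-with-seen-accumulator: the canonical form both programs' dedup behaviour reduces to
def pvDfrom (seen : List String) : List String → List String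
  | [] => []
  | x :: xs => if x ∈ seen then pvDfrom seen xs else x :: pvDfrom (x :: seen) xs

def pvRankN (p : String) : Nat := (PySem.Dict.getD pvRank p 9).toNat

def pvKnown (available : List String) : List String :=
  pvAll.filter (fun p => decide (p ∈ available))

lemma pvDfrom_congr (l s t : List String) (h : ∀ x ∈ l, x ∈ s ↔ x ∈ t) :
    pvDfrom s l = pvDfrom t l := by
  induction l generalizing s t with
  | nil => rfl
  | cons x xs ih =>
    have hx := h x (by simp)
    by_cases hxs : x ∈ s
    · simp [pvDfrom, hxs, hx.mp hxs, ih s t (fun y hy => h y (by simp [hy]))]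
    · have hxt : x ∉ t := fun hc => hxs (hx.mpr hc)
      simp only [pvDfrom, if_neg hxs, if_neg hxt]
      exact congrArg _ (ih (x :: s) (x :: t)
        (fun y hy => by simp [List.mem_cons, h y (by simp [hy])]))

lemma pvFoldl_dedup (l acc : List String) :
    l.foldl (fun ordered p => if p ∈ ordered then ordered else ordered ++ [p]) acc
      = acc ++ pvDfrom acc l := by
  induction l generalizing acc with
  | nil => simp [pvDfrom]
  | cons x xs ih =>
    by_cases hx : x ∈ acc
    · simp [pvDfrom, hx, ih]
    · simp only [List.foldl_cons, if_neg hx, pvDfrom, ih]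
      rw [pvDfrom_congr xs (acc ++ [x]) (x :: acc) (fun y _ => by simp [or_comm])]
      simp

lemma pvDfrom_filter (P : String → Bool) (l s : List String) :
    (pvDfrom s l).filter P = pvDfrom s (l.filter P) := by
  induction l generalizing s with
  | nil => rfl
  | cons x xs ih =>
    by_cases hxs : x ∈ s
    · by_cases hP : P x <;> simp [pvDfrom, hxs, hP, ih]
    · by_cases hP : P x
      · simp [pvDfrom, hxs, hP, ih]
      · simp only [pvDfrom, if_neg hxs, List.filter_cons, hP, Bool.false_eq_true, if_false]
        rw [ih (x :: s)]
        exact pvDfrom_congr _ _ _ (fun y hy => by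
          have hPy : P y := List.of_mem_filter hy
          have : y ≠ x := fun he => by rw [he] at hPy; simp [hP] at hPy
          simp [this])

lemma pvDfrom_drop (P : String → Bool) (l s : List String)
    (h : ∀ x ∈ l, P x = false → x ∈ s) :
    pvDfrom s l = pvDfrom s (l.filter P) := by
  induction l generalizing s with
  | nil => rfl
  | cons x xs ih =>
    by_cases hP : P x
    · by_cases hxs : x ∈ s
      · simp [pvDfrom, hxs, hP, ih s (fun y hy => h y (by simp [hy]))]
      · simp only [pvDfrom, List.filter_cons, hP, if_true, if_neg hxs]
        exact congrArg _ (ih (x :: s) (fun y hy hPy => by simp [h y (by simp [hy]) hPy]))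
    · have hxs : x ∈ s := h x (by simp) (by simpa using hP)
      simp [pvDfrom, hxs, hP, ih s (fun y hy => h y (by simp [hy]))]

lemma pvMem_dfrom (l s : List String) (x : String) : x ∈ pvDfrom s l ↔ x ∈ l ∧ x ∉ s := by
  induction l generalizing s with
  | nil => simp [pvDfrom]
  | cons y ys ih =>
    by_cases hy : y ∈ s
    · simp only [pvDfrom, if_pos hy, ih, List.mem_cons]
      constructor
      · rintro ⟨h1, h2⟩; exact ⟨Or.inr h1, h2⟩
      · rintro ⟨h1 | h1, h2⟩
        · exact absurd (h1 ▸ hy) h2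
        · exact ⟨h1, h2⟩
    · simp only [pvDfrom, if_neg hy, List.mem_cons, ih]
      by_cases hxy : x = y
      · simp [hxy, hy]
      · simp [hxy]

lemma pvDfrom_nodup (l s : List String) : (pvDfrom s l).Nodup := by
  induction l generalizing s with
  | nil => simp [pvDfrom]
  | cons x xs ih =>
    by_cases hx : x ∈ s
    · simp [pvDfrom, hx, ih]
    · simp only [pvDfrom, if_neg hx, List.nodup_cons]
      exact ⟨fun hc => by simp [pvMem_dfrom] at hc, ih (x :: s)⟩

-- rank facts
lemma pvRank_unknown (p : String) (h : p ∉ pvAll) : pvRankN p = 9 := by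
  have hk : pvRank.keys = pvAll := by decide
  have hc : pvRank.contains p = false := by
    rw [PySem.Dict.contains_eq_decide_mem_keys, hk]; simp [h]
  unfold pvRankN
  rw [PySem.Dict.getD_of_not_contains _ _ hc]
  rfl

lemma pvRank_mem_lt (p : String) (h : p ∈ pvAll) : pvRankN p < 9 := by
  fin_cases h <;> decide

lemma pvRank_eq_iff (p : String) (j : Nat) (hj : j < 9) :
    pvRankN p = j ↔ p = pvAll.getD j "" := by
  by_cases hp : p ∈ pvAll
  · fin_cases hp <;> interval_cases j <;> simp <;> decide
  · have h9 := pvRank_unknown p hp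
    constructor
    · intro he; omega
    · intro he
      exfalso; apply hp; rw [he]
      interval_cases j <;> decide

-- the j-th bucket of the deduped input is the j-th platform iff it occurs (j < 9)
lemma pvFilter_rank_known (available : List String) (j : Nat) (a : String)
    (ha : ∀ p, pvRankN p = j ↔ p = a) :
    (pvDfrom [] available).filter (fun p => decide (pvRankN p = j))
      = if a ∈ available then [a] else [] := by
  have h1 : (pvDfrom [] available).filter (fun p => decide (pvRankN p = j))
      = (pvDfrom [] available).filter (fun p => p == a) := by
    apply List.filter_congr
    intro p _
    by_cases hpj : pvRankN p = j
    · have hpa := (ha p).mp hpj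
      subst hpa
      simp [hpj]
    · have hne : p ≠ a := fun he => hpj ((ha p).mpr he)
      simp [hpj, hne]
  rw [h1, List.filter_beq]
  have hnd := pvDfrom_nodup available []
  by_cases hmem : a ∈ available
  · rw [List.count_eq_one_of_mem hnd (by simp [pvMem_dfrom, hmem]), if_pos hmem]
    rfl
  · rw [List.count_eq_zero.mpr (by simp [pvMem_dfrom, hmem]), if_neg hmem]
    rfl

-- A characterisation: tier passes = filter of the flattened tier list; second loop = dedup
lemma pvA_char (available : List String) :
    order_platforms_py available = pvKnown available ++ pvDfrom (pvKnown available) available := by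
  unfold order_platforms_py
  rw [pvFoldl_dedup]
  congr 1 <;>
  · simp only [List.foldl_cons, List.foldl_nil, PySem.List.foldl_append_ite_eq_filter]
    simp [pvKnown, pvAll, List.filter_append]

-- B's fold with its seen-set = plain bucket fold over the deduped input
lemma pvB_fold (l : List String) (seen : PySem.Set String) (buckets : List (List String)) :
    (l.foldl
      (fun (st : PySem.Set String × List (List String)) p =>
        if p ∈ st.1 then st
        else (PySem.Set.add st.1 p,
              st.2.modify (PySem.Dict.getD pvRank p 9).toNat (fun b => b ++ [p])))
      (seen, buckets)).2
      = (pvDfrom seen l).foldl (fun bs p => bs.modify (pvRankN p) (fun b => b ++ [p])) buckets := by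
  induction l generalizing seen buckets with
  | nil => rfl
  | cons x xs ih =>
    by_cases hx : x ∈ seen
    · simp [pvDfrom, hx, ih]
    · simp only [List.foldl_cons, if_neg hx, pvDfrom, List.foldl_cons]
      rw [PySem.Set.add_of_not_mem hx, ih]
      rw [pvDfrom_congr xs (seen ++ [x]) (x :: seen) (fun y _ => by simp [or_comm])]
      rfl

-- the bucket fold, on the literal ten buckets
lemma pvBuckets (d : List String) (b0 b1 b2 b3 b4 b5 b6 b7 b8 b9 : List String) :
    d.foldl (fun bs p => bs.modify (pvRankN p) (fun b => b ++ [p]))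
        [b0, b1, b2, b3, b4, b5, b6, b7, b8, b9]
      = [b0 ++ d.filter (fun p => decide (pvRankN p = 0)),
         b1 ++ d.filter (fun p => decide (pvRankN p = 1)),
         b2 ++ d.filter (fun p => decide (pvRankN p = 2)),
         b3 ++ d.filter (fun p => decide (pvRankN p = 3)),
         b4 ++ d.filter (fun p => decide (pvRankN p = 4)),
         b5 ++ d.filter (fun p => decide (pvRankN p = 5)),
         b6 ++ d.filter (fun p => decide (pvRankN p = 6)),
         b7 ++ d.filter (fun p => decide (pvRankN p = 7)),
         b8 ++ d.filter (fun p => decide (pvRankN p = 8)),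
         b9 ++ d.filter (fun p => decide (pvRankN p = 9))] := by
  have r0 : pvRankN "websosanh" = 0 := by decide
  have r1 : pvRankN "google_shopping" = 1 := by decide
  have r2 : pvRankN "shopee" = 2 := by decide
  have r3 : pvRankN "lazada" = 3 := by decide
  have r4 : pvRankN "tiktok_shop" = 4 := by decide
  have r5 : pvRankN "all_web" = 5 := by decide
  have r6 : pvRankN "facebook_marketplace" = 6 := by decide
  have r7 : pvRankN "instagram_shopping" = 7 := by decide
  have r8 : pvRankN "facebook_groups_auto" = 8 := by decide
  induction d generalizing b0 b1 b2 b3 b4 b5 b6 b7 b8 b9 with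
  | nil => simp
  | cons p d ih =>
    by_cases hp : p ∈ pvAll
    · fin_cases hp
      · simp only [List.foldl_cons]
        rw [r0, show List.modify [b0, b1, b2, b3, b4, b5, b6, b7, b8, b9] 0
            (fun b => b ++ ["websosanh"]) = [b0 ++ ["websosanh"], b1, b2, b3, b4, b5, b6, b7, b8, b9] from rfl, ih]
        simp [r0, List.append_assoc]
      · simp only [List.foldl_cons]
        rw [r1, show List.modify [b0, b1, b2, b3, b4, b5, b6, b7, b8, b9] 1
            (fun b => b ++ ["google_shopping"]) = [b0, b1 ++ ["google_shopping"], b2, b3, b4, b5, b6, b7, b8, b9] from rfl, ih]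
        simp [r1, List.append_assoc]
      · simp only [List.foldl_cons]
        rw [r2, show List.modify [b0, b1, b2, b3, b4, b5, b6, b7, b8, b9] 2
            (fun b => b ++ ["shopee"]) = [b0, b1, b2 ++ ["shopee"], b3, b4, b5, b6, b7, b8, b9] from rfl, ih]
        simp [r2, List.append_assoc]
      · simp only [List.foldl_cons]
        rw [r3, show List.modify [b0, b1, b2, b3, b4, b5, b6, b7, b8, b9] 3
            (fun b => b ++ ["lazada"]) = [b0, b1, b2, b3 ++ ["lazada"], b4, b5, b6, b7, b8, b9] from rfl, ih]
        simp [r3, List.append_assoc]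
      · simp only [List.foldl_cons]
        rw [r4, show List.modify [b0, b1, b2, b3, b4, b5, b6, b7, b8, b9] 4
            (fun b => b ++ ["tiktok_shop"]) = [b0, b1, b2, b3, b4 ++ ["tiktok_shop"], b5, b6, b7, b8, b9] from rfl, ih]
        simp [r4, List.append_assoc]
      · simp only [List.foldl_cons]
        rw [r5, show List.modify [b0, b1, b2, b3, b4, b5, b6, b7, b8, b9] 5
            (fun b => b ++ ["all_web"]) = [b0, b1, b2, b3, b4, b5 ++ ["all_web"], b6, b7, b8, b9] from rfl, ih]
        simp [r5, List.append_assoc]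
      · simp only [List.foldl_cons]
        rw [r6, show List.modify [b0, b1, b2, b3, b4, b5, b6, b7, b8, b9] 6
            (fun b => b ++ ["facebook_marketplace"]) = [b0, b1, b2, b3, b4, b5, b6 ++ ["facebook_marketplace"], b7, b8, b9] from rfl, ih]
        simp [r6, List.append_assoc]
      · simp only [List.foldl_cons]
        rw [r7, show List.modify [b0, b1, b2, b3, b4, b5, b6, b7, b8, b9] 7
            (fun b => b ++ ["instagram_shopping"]) = [b0, b1, b2, b3, b4, b5, b6, b7 ++ ["instagram_shopping"], b8, b9] from rfl, ih]
        simp [r7, List.append_assoc]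
      · simp only [List.foldl_cons]
        rw [r8, show List.modify [b0, b1, b2, b3, b4, b5, b6, b7, b8, b9] 8
            (fun b => b ++ ["facebook_groups_auto"]) = [b0, b1, b2, b3, b4, b5, b6, b7, b8 ++ ["facebook_groups_auto"], b9] from rfl, ih]
        simp [r8, List.append_assoc]
    · have h9 : pvRankN p = 9 := pvRank_unknown p hp
      simp only [List.foldl_cons]
      rw [h9, show List.modify [b0, b1, b2, b3, b4, b5, b6, b7, b8, b9] 9
          (fun b => b ++ [p]) = [b0, b1, b2, b3, b4, b5, b6, b7, b8, b9 ++ [p]] from rfl, ih]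
      simp [h9, List.append_assoc]

-- B characterisation
lemma pvB_char (available : List String) :
    order_platforms_py_alt available
      = (pvDfrom [] available).filter (fun p => decide (pvRankN p = 0))
        ++ (pvDfrom [] available).filter (fun p => decide (pvRankN p = 1))
        ++ (pvDfrom [] available).filter (fun p => decide (pvRankN p = 2))
        ++ (pvDfrom [] available).filter (fun p => decide (pvRankN p = 3))
        ++ (pvDfrom [] available).filter (fun p => decide (pvRankN p = 4))
        ++ (pvDfrom [] available).filter (fun p => decide (pvRankN p = 5))
        ++ (pvDfrom [] available).filter (fun p => decide (pvRankN p = 6))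
        ++ (pvDfrom [] available).filter (fun p => decide (pvRankN p = 7))
        ++ (pvDfrom [] available).filter (fun p => decide (pvRankN p = 8))
        ++ (pvDfrom [] available).filter (fun p => decide (pvRankN p = 9)) := by
  have hn : PySem.List.len pvAll = 9 := by decide
  simp only [order_platforms_py_alt, hn]
  rw [show ((9 : Int).toNat + 1) = 10 from by decide]
  rw [show (List.replicate 10 ([] : List String))
      = [[], [], [], [], [], [], [], [], [], []] from rfl]
  rw [show (PySem.Set.empty : PySem.Set String) = [] from rfl]
  rw [pvB_fold, pvBuckets]
  simp [List.flatten, List.append_assoc]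

-- the unknown tails agree
lemma pvTail_eq (available : List String) :
    pvDfrom (pvKnown available) available
      = (pvDfrom [] available).filter (fun p => decide (pvRankN p = 9)) := by
  rw [pvDfrom_filter]
  rw [pvDfrom_drop (fun p => decide (pvRankN p = 9)) available (pvKnown available)
    (by
      intro x hx hPx
      have hx9 : pvRankN x ≠ 9 := by simpa using hPx
      have hxall : x ∈ pvAll := by
        by_contra hc
        exact hx9 (pvRank_unknown x hc)
      simp [pvKnown, List.mem_filter, hxall, hx])]
  apply pvDfrom_congr
  intro y hy
  have h9 : pvRankN y = 9 := by simpa using List.of_mem_filter hy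
  have hyk : y ∉ pvKnown available := by
    intro hc
    have : y ∈ pvAll := (List.mem_filter.mp hc).1
    exact absurd h9 (by have := pvRank_mem_lt y this; omega)
  simp [hyk]

-- filter over a cons, append form (to line up the two sides' known parts)
lemma pvFilter_cons_append (P : String → Bool) (x : String) (xs : List String) :
    List.filter P (x :: xs) = (if P x then [x] else []) ++ List.filter P xs := by
  by_cases h : P x <;> simp [h]

-- ===== VERDICT (by name: the statement is the Claim_ definition above) =====
theorem order_platforms_py_spec : Claim_equal_order_platforms_py := by
  intro available _
  show order_platforms_py available = order_platforms_py_alt available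
  rw [pvA_char, pvB_char, pvTail_eq]
  rw [pvFilter_rank_known available 0 "websosanh"
      (fun p => by rw [pvRank_eq_iff p 0 (by omega)]; rfl),
    pvFilter_rank_known available 1 "google_shopping"
      (fun p => by rw [pvRank_eq_iff p 1 (by omega)]; rfl),
    pvFilter_rank_known available 2 "shopee"
      (fun p => by rw [pvRank_eq_iff p 2 (by omega)]; rfl),
    pvFilter_rank_known available 3 "lazada"
      (fun p => by rw [pvRank_eq_iff p 3 (by omega)]; rfl),
    pvFilter_rank_known available 4 "tiktok_shop"
      (fun p => by rw [pvRank_eq_iff p 4 (by omega)]; rfl),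
    pvFilter_rank_known available 5 "all_web"
      (fun p => by rw [pvRank_eq_iff p 5 (by omega)]; rfl),
    pvFilter_rank_known available 6 "facebook_marketplace"
      (fun p => by rw [pvRank_eq_iff p 6 (by omega)]; rfl),
    pvFilter_rank_known available 7 "instagram_shopping"
      (fun p => by rw [pvRank_eq_iff p 7 (by omega)]; rfl),
    pvFilter_rank_known available 8 "facebook_groups_auto"
      (fun p => by rw [pvRank_eq_iff p 8 (by omega)]; rfl)]
  simp only [pvKnown, pvAll, pvTier1, pvTier2, pvTier3, pvBrowser, List.cons_append,
    List.nil_append, pvFilter_cons_append, List.filter_nil, decide_eq_true_eq]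
  simp [List.append_assoc]
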